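-- pv_equiv track=rewrite | github.com/stefano-maggiolo/pydepgraph | pydepgraph/__init__.py | draw_arrows
-- ===== SOURCE A (Python) =====
-- xrange = range
--
-- def in_package(mod, pkg):
--     """Return if mod is a subpackage of pkg.
--
--     mod (str): a module name.
--     pkg (str): a package name.
--
--     return (bool): True if mod is a subpackage of pkg.
--
--     """
--     if mod == pkg:
--         return True
--     else:
--         return mod.startswith("%s." % pkg)
--
-- def distance(pkg1, pkg2):
--     """Return the distance between two packages.
--
--     pkg1 (str): a package name.
--     pkg2 (str): a package name.
--
--     return (int): the distance in hops between pkg1 and pkg2.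
--
--     """
--
--     split1 = pkg1.split(".")
--     split2 = pkg2.split(".")
--     dist = 0
--     for i in xrange(len(split2), 0, -1):
--         if in_package(pkg1, ".".join(split2[:i])):
--             break
--         dist += 1
--     for i in xrange(len(split1), 0, -1):
--         if in_package(pkg2, ".".join(split1[:i])):
--             break
--         dist += 1
--     return dist
--
-- def get_max_dist(graph):
--     """Return the maximum length of an edge in graph.
--
--     graph ({str: [str]}): a graph of packages as an adjacency matrix.
--
--     return (int): maximum length (in hops) of an edge.
--
--     """
--     max_dist = 0
--     for name in graph:
--         for name_ in graph[name]:
--             if name_ in graph: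
--                 max_dist = max(max_dist, distance(name, name_))
--     return max_dist
--
-- def escape(name):
--     """Return name suitable for being used as a node name in DOT.
--
--     name (str): a package name.
--
--     return (str): name formatted as a DOT node name.
--
--     """
--     return name.replace(".", "_").replace("-", "_")
--
-- def draw_arrows(graph):
--     """Draw all arrows of the graph using the usual distance function.
--
--     graph ({str: [str]}): the graph.
--
--     return (str): the string representing the arrows in dot format.
--
--     """
--     string = ""
--     max_dist = get_max_dist(graph)
--     for name in graph:
--         for name_ in graph[name]:
--             if name_ in graph:
--                 string += '%s -> %s [weight=%d];\n' % (
--                     escape(name), escape(name_),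
--                     2 ** (max_dist - distance(name, name_)))
--     return string
-- ===== SOURCE B (Python) =====
-- def draw_arrows(graph):
--     """Draw all arrows of the graph using the usual distance function."""
--     keys = set(graph)
--
--     def esc(name):
--         return ''.join('_' if ch in '.-' else ch for ch in name)
--
--     def dist(a, b):
--         # distance = hops up from a to the common ancestor package + hops down to b
--         xs = a.split(".")
--         ys = b.split(".")
--         c = 0
--         while c < len(xs) and c < len(ys) and xs[c] == ys[c]:
--             c += 1
--         return (len(xs) - c) + (len(ys) - c)
--
--     edges = [(esc(a), esc(b), dist(a, b))
--              for a, bs in graph.items() for b in bs if b in keys]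
--     m = max((d for _, _, d in edges), default=0)
--     return ''.join('%s -> %s [weight=%d];\n' % (a, b, 2 ** (m - d))
--                    for a, b, d in edges)
-- ===== Notes on version B (the rewrite author's own statement) =====
-- stated objective: alternative
-- what changed: B replaces every component's algorithm: distance becomes the closed form (len1-c)+(len2-c) over a common-prefix count of the split component lists instead of A's two descending range loops that re-join slices and test string prefixes; escape becomes a single character map instead of two chained str.replace passes; key membership goes through a set built once; and one edge-collecting pass feeds both the max and the formatting instead of A's two full scans that compute every distance twice.
import Mathlib
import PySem

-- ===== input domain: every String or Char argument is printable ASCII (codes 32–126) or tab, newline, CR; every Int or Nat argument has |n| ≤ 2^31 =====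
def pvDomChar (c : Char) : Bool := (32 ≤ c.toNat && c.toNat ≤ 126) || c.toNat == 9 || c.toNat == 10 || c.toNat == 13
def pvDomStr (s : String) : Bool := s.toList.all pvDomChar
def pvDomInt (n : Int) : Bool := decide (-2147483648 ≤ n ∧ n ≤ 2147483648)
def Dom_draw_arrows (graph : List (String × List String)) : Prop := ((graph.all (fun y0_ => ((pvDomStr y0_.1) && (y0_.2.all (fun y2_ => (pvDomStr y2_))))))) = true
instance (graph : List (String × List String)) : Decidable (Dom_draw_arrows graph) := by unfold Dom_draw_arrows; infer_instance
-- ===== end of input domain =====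

-- B re-implements every component differently: escape as a single character map (A chains two
-- str.replace passes), distance as a closed form len1+len2-2*commonPrefix over the split lists
-- (A runs two descending range loops re-joining slices and testing string prefixes), key lookup
-- through a set of the keys built once, and one edge-collecting pass whose table is then
-- formatted (A rescans the graph twice and computes every distance twice); objective: alternative.

-- ===== PORT A =====
-- module helpers of Source A
def in_package (mod pkg : String) : Bool :=
  if mod == pkg then true else PySem.Str.startswith mod (pkg ++ ".")

-- one 'for i in range(len(split), 0, -1): if in_package(...): break; dist += 1' loop
def distance_half (pkg : String) (split : List String) : List Int → Int → Int
  | [], dist => dist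
  | i :: rest, dist =>
    if in_package pkg (PySem.Str.join "." (PySem.List.slice split none (some i))) then dist
    else distance_half pkg split rest (dist + 1)

def distance (pkg1 pkg2 : String) : Int :=
  -- sep "." is nonempty, so Str.split? is always `some`; the [] default is never taken
  let split1 := (PySem.Str.split? pkg1 ".").getD []
  let split2 := (PySem.Str.split? pkg2 ".").getD []
  let dist := distance_half pkg1 split2 (PySem.List.pyRange split2.length 0 (-1)) 0
  distance_half pkg2 split1 (PySem.List.pyRange split1.length 0 (-1)) dist

def escape (name : String) : String :=
  PySem.Str.replace (PySem.Str.replace name "." "_") "-" "_"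

-- 'name_ in graph' on the dict
def keyIn (graph : List (String × List String)) (k : String) : Bool :=
  graph.any (fun p => p.1 == k)

-- '%s -> %s [weight=%d];\n' % (a, b, w)
def fmtArrow (a b : String) (w : Int) : String :=
  a ++ " -> " ++ b ++ " [weight=" ++ PySem.Int.toStr w ++ "];\n"

def get_max_dist (graph : List (String × List String)) : Int :=
  graph.foldl (fun md p =>
    p.2.foldl (fun md n_ =>
      if keyIn graph n_ then max md (distance p.1 n_) else md) md) 0

def draw_arrows (graph : List (String × List String)) : String :=
  let max_dist := get_max_dist graph
  graph.foldl (fun s p =>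
    p.2.foldl (fun s n_ =>
      if keyIn graph n_ then
        s ++ fmtArrow (escape p.1) (escape n_) (2 ^ (max_dist - distance p.1 n_).toNat)
      else s) s) ""

-- ===== PORT B =====
-- ''.join('_' if ch in '.-' else ch for ch in name): a join of single characters is the string of them
def escape_alt (name : String) : String :=
  String.ofList (name.toList.map (fun ch => if ch == '.' || ch == '-' then '_' else ch))

-- the 'while c < len(xs) and c < len(ys) and xs[c] == ys[c]: c += 1' counter
def commonLen : List String → List String → Nat
  | x :: xs, y :: ys => if x == y then commonLen xs ys + 1 else 0
  | _, _ => 0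

def distance_alt (a b : String) : Int :=
  let xs := (PySem.Str.split? a ".").getD []
  let ys := (PySem.Str.split? b ".").getD []
  let c := commonLen xs ys
  ((xs.length : Int) - (c : Int)) + ((ys.length : Int) - (c : Int))

def draw_arrows_alt (graph : List (String × List String)) : String :=
  let keys : PySem.Set String := PySem.Set.ofList (graph.map Prod.fst)
  let edges := graph.flatMap (fun p =>
    (p.2.filter (fun n_ => PySem.Set.contains keys n_)).map
      (fun n_ => (escape_alt p.1, escape_alt n_, distance_alt p.1 n_)))
  let m := (edges.map (fun e => e.2.2)).foldl max 0
  PySem.Str.join "" (edges.map (fun e =>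
    e.1 ++ " -> " ++ e.2.1 ++ " [weight=" ++ PySem.Int.toStr (2 ^ (m - e.2.2).toNat) ++ "];\n"))

-- ===== PRECONDITION & SPEC =====
def Spec_draw_arrows (graph : List (String × List String)) (out : String) : Prop := out = draw_arrows_alt graph
instance (graph : List (String × List String)) (out : String) : Decidable (Spec_draw_arrows graph out) := by unfold Spec_draw_arrows; infer_instance

-- ===== CLAIM (what is proved, stated in full; the proofs are below) =====
def Claim_equal_draw_arrows : Prop := ∀ (graph : List (String × List String)), Dom_draw_arrows graph → Spec_draw_arrows graph (draw_arrows graph)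

-- ===== LEMMAS AND PROOFS =====

-- (1) escape = escape_alt (single-character replace is a map) ---------------
theorem replace_go_single (o n : Char) (l acc : List Char) (fuel : Nat) (h : l.length ≤ fuel) :
    PySem.Chars.replace.go [o] [n] fuel l acc
      = acc.reverse ++ l.map (fun c => if c == o then n else c) := by
  induction l generalizing fuel acc with
  | nil => cases fuel <;> simp [PySem.Chars.replace.go]
  | cons c t ih =>
    cases fuel with
    | zero => simp at h
    | succ f =>
      rw [PySem.Chars.replace.go]
      by_cases hc : c = o
      · subst hc
        simp only [List.isPrefixOf, BEq.rfl, Bool.true_and, List.isPrefixOf_nil_left, if_true]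
        have hd : List.drop [c].length (c :: t) = t := rfl
        rw [hd, ih _ _ (by simpa using Nat.le_of_succ_le_succ h)]
        simp
      · have : [o].isPrefixOf (c :: t) = false := by
          simp [List.isPrefixOf]; exact fun hh => (hc hh.symm).elim
        rw [this]
        simp only [Bool.false_eq_true, if_false]
        rw [ih _ _ (by simpa using Nat.le_of_succ_le_succ h)]
        simp [hc]
theorem replace_single (s : List Char) (o n : Char) :
    PySem.Chars.replace s [o] [n] = s.map (fun c => if c == o then n else c) := by
  rw [PySem.Chars.replace]
  simp [replace_go_single o n s [] s.length (le_refl _)]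
theorem escape_eq (s : String) : escape_alt s = escape s := by
  rw [← String.toList_inj]
  unfold escape escape_alt
  rw [String.toList_ofList, PySem.Str.toList_replace, PySem.Str.toList_replace]
  have h1 : (".":String).toList = ['.'] := rfl
  have h2 : ("-":String).toList = ['-'] := rfl
  have h3 : ("_":String).toList = ['_'] := rfl
  rw [h1, h2, h3, replace_single, replace_single, List.map_map]
  apply List.map_congr_left
  intro c _
  by_cases hc : c = '.' <;> by_cases hd : c = '-' <;> simp [hc, hd]
theorem keys_contains_eq (graph : List (String × List String)) (n : String) :
    PySem.Set.contains (PySem.Set.ofList (graph.map Prod.fst)) n = keyIn graph n := by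
  rcases h : keyIn graph n with _ | _
  · rcases hc : PySem.Set.contains (PySem.Set.ofList (graph.map Prod.fst)) n with _ | _
    · rfl
    · exfalso
      have := (PySem.Set.contains_iff _ _).mp hc
      rw [PySem.Set.mem_ofList] at this
      rcases List.mem_map.mp this with ⟨p, hp, hpe⟩
      have : keyIn graph n = true := by
        unfold keyIn
        exact List.any_eq_true.mpr ⟨p, hp, by simp [hpe]⟩
      simp [h] at this
  · unfold keyIn at h
    rcases List.any_eq_true.mp h with ⟨p, hp, he⟩
    apply (PySem.Set.contains_iff _ _).mpr
    rw [PySem.Set.mem_ofList]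
    exact List.mem_map.mpr ⟨p, hp, by simpa using he⟩

-- (3) distance = distance_alt -----------------------------------------------

-- structural splitter equal to PySem's fuelled one for sep = "."
def mySplit (pre : List Char) : List Char → List (List Char)
  | [] => [pre]
  | c :: t => if c = '.' then pre :: mySplit [] t else mySplit (pre ++ [c]) t

theorem splitOn_go_eq (l : List Char) : ∀ (fuel : Nat) (cur : List Char) (acc : List (List Char)),
    l.length ≤ fuel →
    PySem.Chars.splitOn.go ['.'] fuel l cur acc = acc.reverse ++ mySplit cur.reverse l := by
  induction l with
  | nil =>
    intro fuel cur acc _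
    cases fuel <;> simp [PySem.Chars.splitOn.go, mySplit]
  | cons c t ih =>
    intro fuel cur acc h
    cases fuel with
    | zero => simp at h
    | succ f =>
      rw [PySem.Chars.splitOn.go]
      by_cases hc : c = '.'
      · subst hc
        simp only [List.isPrefixOf, BEq.rfl, Bool.true_and, List.isPrefixOf_nil_left, if_true]
        have hd : List.drop ['.'].length ('.' :: t) = t := rfl
        rw [hd, ih f [] (cur.reverse :: acc) (by simpa using Nat.le_of_succ_le_succ h)]
        simp [mySplit]
      · have hp : ['.'].isPrefixOf (c :: t) = false := by
          simp [List.isPrefixOf]; exact fun hh => (hc hh.symm).elim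
        rw [hp]
        simp only [Bool.false_eq_true, if_false]
        rw [ih f (c :: cur) acc (by simpa using Nat.le_of_succ_le_succ h)]
        simp [mySplit, hc]

theorem splitOn_eq (l : List Char) : PySem.Chars.splitOn l ['.'] = mySplit [] l := by
  rw [PySem.Chars.splitOn, splitOn_go_eq l (l.length + 1) [] [] (by omega)]
  simp

theorem split_dot_eq (s : String) :
    (PySem.Str.split? s ".").getD [] = (mySplit [] s.toList).map String.ofList := by
  rw [PySem.Str.split?]
  have h1 : (".":String).toList = ['.'] := rfl
  simp [PySem.Chars.split?, h1, splitOn_eq]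

-- round trip
theorem mySplit_ne_nil (pre l) : mySplit pre l ≠ [] := by
  induction l generalizing pre with
  | nil => simp [mySplit]
  | cons c t ih => by_cases hc : c = '.' <;> simp [mySplit, hc, ih]

theorem join_cons (x : List Char) (ys : List (List Char)) (h : ys ≠ []) :
    PySem.Chars.join ['.'] (x :: ys) = x ++ '.' :: PySem.Chars.join ['.'] ys := by
  cases ys with
  | nil => simp at h
  | cons y t => rw [PySem.Chars.join_cons_cons]; simp

theorem join_mySplit (l : List Char) : ∀ pre, PySem.Chars.join ['.'] (mySplit pre l) = pre ++ l := by
  induction l with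
  | nil => intro pre; simp [mySplit, PySem.Chars.join_singleton]
  | cons c t ih =>
    intro pre
    by_cases hc : c = '.'
    · subst hc
      rw [mySplit, if_pos rfl, join_cons _ _ (mySplit_ne_nil _ _), ih []]
      simp
    · rw [mySplit, if_neg hc, ih (pre ++ [c])]
      simp

theorem mySplit_dot_free (l : List Char) : ∀ pre, '.' ∉ pre →
    ∀ p ∈ mySplit pre l, '.' ∉ p := by
  induction l with
  | nil => intro pre hpre p hp; rw [mySplit] at hp; simp at hp; subst hp; exact hpre
  | cons c t ih =>
    intro pre hpre p hp
    by_cases hc : c = '.'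
    · subst hc
      rw [mySplit, if_pos rfl] at hp
      rcases List.mem_cons.mp hp with h | h
      · subst h; exact hpre
      · exact ih [] (by simp) p h
    · rw [mySplit, if_neg hc] at hp
      exact ih (pre ++ [c]) (by simp [hpre]; exact fun h => hc h.symm) p hp

theorem takeWhile_dot (a b : List Char) (ha : '.' ∉ a) :
    (a ++ '.' :: b).takeWhile (fun c => c != '.') = a := by
  induction a with
  | nil => simp [List.takeWhile]
  | cons x t ih =>
    have hx : x ≠ '.' := fun h => ha (by simp [h])
    simp only [List.cons_append, List.takeWhile_cons]
    simp [hx, ih (fun h => ha (by simp [h]))]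

theorem dotfree_head_eq {u v r w : List Char} (hu : '.' ∉ u) (hv : '.' ∉ v)
    (h : u ++ '.' :: r = v ++ '.' :: w) : u = v ∧ r = w := by
  have huv : u = v := by
    have := congrArg (List.takeWhile (fun c => c != '.')) h
    rwa [takeWhile_dot _ _ hu, takeWhile_dot _ _ hv] at this
  subst huv
  exact ⟨rfl, by simpa using h⟩

theorem dotfree_prefix_eq {u v w : List Char} (hu : '.' ∉ u) (hv : '.' ∉ v)
    (h : u ++ ['.'] <+: v ++ '.' :: w) : u = v := by
  rcases h with ⟨t, ht⟩
  have : u ++ '.' :: t = v ++ '.' :: w := by simpa using ht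
  exact (dotfree_head_eq hu hv this).1

theorem join_prefix_iff (ys : List (List Char)) : ∀ (xs : List (List Char)), ys ≠ [] → xs ≠ [] →
    (∀ p ∈ ys, '.' ∉ p) → (∀ p ∈ xs, '.' ∉ p) →
    ((PySem.Chars.join ['.'] ys = PySem.Chars.join ['.'] xs ∨
      PySem.Chars.join ['.'] ys ++ ['.'] <+: PySem.Chars.join ['.'] xs) ↔ ys <+: xs) := by
  induction ys with
  | nil => intro xs h; simp at h
  | cons y ys ih =>
    intro xs _ hxs hdy hdx
    cases xs with
    | nil => simp at hxs
    | cons x xs' =>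
      have hy : '.' ∉ y := hdy y (List.mem_cons_self)
      have hx : '.' ∉ x := hdx x (List.mem_cons_self)
      cases ys with
      | nil =>
        rw [PySem.Chars.join_singleton]
        cases xs' with
        | nil =>
          rw [PySem.Chars.join_singleton]
          constructor
          · rintro (h | h)
            · rw [h]
            · exact absurd (h.mem (List.mem_append_right _ List.mem_cons_self)) hx
          · intro h
            rcases List.cons_prefix_cons.mp h with ⟨he, _⟩
            exact Or.inl (congrArg id he)
        | cons x' t =>
          rw [join_cons _ _ (List.cons_ne_nil _ _)]
          constructor
          · rintro (h | h)
            · exact absurd (by rw [h]; exact List.mem_append_right x List.mem_cons_self : '.' ∈ y) hy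
            · have := dotfree_prefix_eq hy hx h
              exact this ▸ (List.cons_prefix_cons.mpr ⟨rfl, List.nil_prefix⟩)
          · intro h
            rcases List.cons_prefix_cons.mp h with ⟨he, _⟩
            subst he
            exact Or.inr ⟨PySem.Chars.join ['.'] (x' :: t), by simp⟩
      | cons y' ys'' =>
        rw [join_cons _ _ (List.cons_ne_nil _ _)]
        have hdy' : ∀ p ∈ y' :: ys'', '.' ∉ p := fun p hp => hdy p (List.mem_cons_of_mem _ hp)
        cases xs' with
        | nil =>
          rw [PySem.Chars.join_singleton]
          constructor
          · rintro (h | h)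
            · exact absurd (h ▸ List.mem_append_right y List.mem_cons_self) hx
            · exact absurd (h.mem (List.mem_append_right _ List.mem_cons_self)) hx
          · intro h
            rcases List.cons_prefix_cons.mp h with ⟨_, h2⟩
            exact absurd h2 (by simp)
        | cons x' t =>
          rw [join_cons _ _ (List.cons_ne_nil _ _)]
          have hdx' : ∀ p ∈ x' :: t, '.' ∉ p := fun p hp => hdx p (List.mem_cons_of_mem _ hp)
          have ihx := ih (x' :: t) (List.cons_ne_nil _ _) (List.cons_ne_nil _ _) hdy' hdx'
          constructor
          · rintro (h | h)
            · rcases dotfree_head_eq hy hx h with ⟨he, hj⟩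
              subst he
              exact List.cons_prefix_cons.mpr ⟨rfl, ihx.mp (Or.inl hj)⟩
            · rcases h with ⟨t2, ht2⟩
              have ht2' : y ++ '.' :: (PySem.Chars.join ['.'] (y' :: ys'') ++ ['.'] ++ t2)
                  = x ++ '.' :: PySem.Chars.join ['.'] (x' :: t) := by
                rw [← ht2]; simp
              rcases dotfree_head_eq hy hx ht2' with ⟨he, hj⟩
              subst he
              refine List.cons_prefix_cons.mpr ⟨rfl, ihx.mp (Or.inr ?_)⟩
              exact ⟨t2, by simpa using hj⟩
          · intro h
            rcases List.cons_prefix_cons.mp h with ⟨he, h2⟩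
            subst he
            rcases ihx.mpr h2 with h3 | h3
            · exact Or.inl (by rw [h3])
            · rcases h3 with ⟨t2, ht2⟩
              refine Or.inr ⟨t2, ?_⟩
              rw [← ht2]; simp

theorem commonLen_comm (xs : List String) : ∀ ys, commonLen xs ys = commonLen ys xs := by
  induction xs with
  | nil => intro ys; cases ys <;> rfl
  | cons x xs ih =>
    intro ys
    cases ys with
    | nil => rfl
    | cons y ys =>
      by_cases h : x = y
      · subst h; simp [commonLen, ih]
      · have h2 : ¬ y = x := fun hh => h hh.symm
        simp [commonLen, h, h2]

theorem commonLen_le_right (xs : List String) : ∀ ys, commonLen xs ys ≤ ys.length := by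
  induction xs with
  | nil => intro ys; cases ys <;> simp [commonLen]
  | cons x xs ih =>
    intro ys
    cases ys with
    | nil => simp [commonLen]
    | cons y ys =>
      by_cases h : x = y <;> simp [commonLen, h]
      exact ih ys

theorem take_prefix_iff_commonLen (ys : List String) : ∀ (xs : List String) (j : Nat),
    j ≤ ys.length → (ys.take j <+: xs ↔ j ≤ commonLen xs ys) := by
  induction ys with
  | nil =>
    intro xs j hj
    simp at hj
    simp [hj]
  | cons y ys ih =>
    intro xs j hj
    cases j with
    | zero => simp
    | succ j =>
      cases xs with
      | nil =>
        simp only [List.take_succ_cons, commonLen]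
        constructor
        · rintro ⟨t, ht⟩; simp at ht
        · omega
      | cons x xs =>
        simp only [List.take_succ_cons, List.cons_prefix_cons]
        by_cases h : x = y
        · subst h
          simp only [commonLen, BEq.rfl, if_true]
          constructor
          · rintro ⟨_, h2⟩
            rw [ih xs j (by simpa using hj)] at h2
            omega
          · intro h2
            exact ⟨by trivial, (ih xs j (by simpa using hj)).mpr (by omega)⟩
        · simp only [commonLen]
          rw [if_neg (by simpa using h)]
          constructor
          · rintro ⟨h1, _⟩; exact absurd h1.symm h
          · omega

theorem in_package_eq_or (a p : String) :
    in_package a p = (a == p || PySem.Str.startswith a (p ++ ".")) := by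
  unfold in_package
  by_cases h : a == p <;> simp [h]

theorem in_package_char (a b : String) (j : Nat) (hj1 : 1 ≤ j) :
    in_package a (PySem.Str.join "." (((mySplit [] b.toList).map String.ofList).take j))
      = decide ((mySplit [] b.toList).take j <+: mySplit [] a.toList) := by
  have hL1 : mySplit [] a.toList ≠ [] := mySplit_ne_nil _ _
  have hL2 : mySplit [] b.toList ≠ [] := mySplit_ne_nil _ _
  set L1 := mySplit [] a.toList with hL1d
  set L2 := mySplit [] b.toList with hL2d
  have htake_ne : L2.take j ≠ [] := by
    rw [Ne, List.take_eq_nil_iff]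
    push_neg
    exact ⟨by omega, hL2⟩
  have hdot1 : ∀ q ∈ L1, '.' ∉ q := mySplit_dot_free _ [] (by simp)
  have hdot2 : ∀ q ∈ L2.take j, '.' ∉ q :=
    fun q hq => mySplit_dot_free _ [] (by simp) q (List.take_subset _ _ hq)
  have hptl : (PySem.Str.join "." ((L2.map String.ofList).take j)).toList
      = PySem.Chars.join ['.'] (L2.take j) := by
    rw [PySem.Str.toList_join]
    have : (".":String).toList = ['.'] := rfl
    rw [this, ← List.map_take, List.map_map]
    simp [Function.comp_def]
  have hatl : a.toList = PySem.Chars.join ['.'] L1 := by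
    rw [hL1d, join_mySplit]; rfl
  have hiff : in_package a (PySem.Str.join "." ((L2.map String.ofList).take j)) = true
      ↔ L2.take j <+: L1 := by
    rw [in_package_eq_or]
    rw [Bool.or_eq_true, beq_iff_eq, PySem.Str.startswith_eq]
    rw [PySem.Chars.startswith_iff]
    have happ : (PySem.Str.join "." ((L2.map String.ofList).take j) ++ ".").toList
        = PySem.Chars.join ['.'] (L2.take j) ++ ['.'] := by
      rw [String.toList_append, hptl]; rfl
    rw [happ, hatl]
    have hstr_eq : a = PySem.Str.join "." ((L2.map String.ofList).take j)
        ↔ PySem.Chars.join ['.'] (L2.take j) = PySem.Chars.join ['.'] L1 := by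
      rw [← String.toList_inj, hptl, hatl, eq_comm]
    rw [hstr_eq]
    exact join_prefix_iff (L2.take j) L1 htake_ne hL1 hdot2 hdot1
  by_cases hp : L2.take j <+: L1
  · simp only [hp, decide_true]
    exact hiff.mpr hp
  · simp only [hp, decide_false]
    exact Bool.eq_false_iff.mpr (fun hc => hp (hiff.mp hc))

theorem prefix_map_ofList (u v : List (List Char)) :
    (u.map String.ofList <+: v.map String.ofList) ↔ u <+: v := by
  constructor
  · intro h
    have h2 := h.map String.toList
    simpa [List.map_map, Function.comp_def] using h2
  · intro h; exact h.map _

theorem half_loop (pkg : String) (split : List String) (c : Nat)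
    (hc : ∀ j : Nat, 1 ≤ j → j ≤ split.length →
      in_package pkg (PySem.Str.join "." (PySem.List.slice split none (some (j:Int)))) = decide (j ≤ c)) :
    ∀ (k : Nat) (d : Int), k ≤ split.length →
      distance_half pkg split (PySem.List.pyRange (k:Int) 0 (-1)) d = d + ((k - c : Nat) : Int) := by
  intro k
  induction k with
  | zero =>
    intro d _
    rw [Nat.cast_zero, PySem.List.pyRange_neg_one_eq_nil (le_refl 0)]
    simp [distance_half]
  | succ k ih =>
    intro d hk
    rw [PySem.List.pyRange_neg_one_cons (by exact_mod_cast Nat.succ_pos k)]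
    have hsub : ((k+1 : Nat) : Int) - 1 = ((k : Nat) : Int) := by push_cast; ring
    rw [hsub, distance_half, hc (k+1) (by omega) hk]
    by_cases h : k + 1 ≤ c
    · rw [decide_eq_true h]
      simp only [if_true]
      have : ((k + 1 - c : Nat) : Int) = 0 := by omega
      omega
    · rw [decide_eq_false h]
      simp only [Bool.false_eq_true, if_false]
      rw [ih (d + 1) (by omega)]
      omega

theorem hc_general (a b : String) :
    ∀ j : Nat, 1 ≤ j → j ≤ ((PySem.Str.split? b ".").getD []).length →
      in_package a (PySem.Str.join "."
          (PySem.List.slice ((PySem.Str.split? b ".").getD []) none (some (j:Int))))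
        = decide (j ≤ commonLen ((PySem.Str.split? a ".").getD []) ((PySem.Str.split? b ".").getD [])) := by
  intro j hj1 hj2
  rw [PySem.List.slice_to _ (by positivity), Int.toNat_natCast]
  rw [split_dot_eq b] at hj2
  rw [split_dot_eq a, split_dot_eq b]
  rw [in_package_char a b j hj1]
  congr 1
  rw [eq_iff_iff]
  calc (mySplit [] b.toList).take j <+: mySplit [] a.toList
      ↔ ((mySplit [] b.toList).take j).map String.ofList <+: (mySplit [] a.toList).map String.ofList :=
        (prefix_map_ofList _ _).symm
    _ ↔ ((mySplit [] b.toList).map String.ofList).take j <+: (mySplit [] a.toList).map String.ofList := by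
        rw [List.map_take]
    _ ↔ j ≤ commonLen ((mySplit [] a.toList).map String.ofList) ((mySplit [] b.toList).map String.ofList) :=
        take_prefix_iff_commonLen _ _ j (by simpa using hj2)

theorem distance_eq (a b : String) : distance_alt a b = distance a b := by
  unfold distance distance_alt
  dsimp only
  have hcomm : commonLen ((PySem.Str.split? b ".").getD []) ((PySem.Str.split? a ".").getD [])
      = commonLen ((PySem.Str.split? a ".").getD []) ((PySem.Str.split? b ".").getD []) :=
    commonLen_comm _ _
  have h2 := half_loop a ((PySem.Str.split? b ".").getD [])
      (commonLen ((PySem.Str.split? a ".").getD []) ((PySem.Str.split? b ".").getD []))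
      (hc_general a b) ((PySem.Str.split? b ".").getD []).length 0 (le_refl _)
  have h1 := half_loop b ((PySem.Str.split? a ".").getD [])
      (commonLen ((PySem.Str.split? b ".").getD []) ((PySem.Str.split? a ".").getD []))
      (hc_general b a) ((PySem.Str.split? a ".").getD []).length
      (distance_half a ((PySem.Str.split? b ".").getD [])
        (PySem.List.pyRange (((PySem.Str.split? b ".").getD []).length : Int) 0 (-1)) 0)
      (le_refl _)
  rw [h1, h2, hcomm]
  have hle1 := commonLen_le_right ((PySem.Str.split? b ".").getD []) ((PySem.Str.split? a ".").getD [])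
  have hle2 := commonLen_le_right ((PySem.Str.split? a ".").getD []) ((PySem.Str.split? b ".").getD [])
  rw [hcomm] at hle1
  omega

-- (4) assembling the output ------------------------------------------------
def strCat : List String → String
  | [] => ""
  | x :: xs => x ++ strCat xs

theorem strCat_append (xs ys : List String) : strCat (xs ++ ys) = strCat xs ++ strCat ys := by
  induction xs with
  | nil => simp [strCat]
  | cons x xs ih => simp [strCat, ih, String.append_assoc]

theorem join_empty_eq_strCat (l : List String) : PySem.Str.join "" l = strCat l := by
  rw [← String.toList_inj, PySem.Str.toList_join]
  have h0 : ("" : String).toList = [] := rfl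
  rw [h0]
  induction l with
  | nil => simp [strCat, PySem.Chars.join_nil]
  | cons x xs ih =>
    cases xs with
    | nil => simp [strCat, PySem.Chars.join_singleton]
    | cons y ys =>
      simp only [List.map_cons] at ih ⊢
      rw [PySem.Chars.join_cons_cons, ih]
      simp [strCat, String.toList_append]

theorem foldl_flatMap_eq {α β γ : Type} (g : α → List γ) (f : β → γ → β) (l : List α) (init : β) :
    (l.flatMap g).foldl f init = l.foldl (fun acc p => (g p).foldl f acc) init := by
  induction l generalizing init with
  | nil => rfl
  | cons x xs ih => simp [List.flatMap_cons, List.foldl_append, ih]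

theorem foldl_str_append_if {α : Type} (p : α → Bool) (f : α → String) (l : List α) (s : String) :
    l.foldl (fun acc x => if p x then acc ++ f x else acc) s = s ++ strCat ((l.filter p).map f) := by
  induction l generalizing s with
  | nil => simp [strCat]
  | cons x xs ih =>
    by_cases h : p x = true
    · simp [h, ih, strCat, String.append_assoc]
    · simp [List.foldl_cons, h, ih]

theorem foldl_str_outer {α : Type} (g : α → List String) (l : List α) (s : String) :
    l.foldl (fun acc x => acc ++ strCat (g x)) s = s ++ strCat (l.flatMap g) := by
  induction l generalizing s with
  | nil => simp [strCat]
  | cons x xs ih => simp [List.flatMap_cons, ih, strCat_append, String.append_assoc]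

theorem max_dist_eq (graph : List (String × List String)) :
    ((graph.flatMap (fun p =>
        (p.2.filter (fun n_ => keyIn graph n_)).map
          (fun n_ => (escape p.1, escape n_, distance p.1 n_)))).map
      (fun e => e.2.2)).foldl max 0 = get_max_dist graph := by
  rw [List.map_flatMap, foldl_flatMap_eq]
  unfold get_max_dist
  apply PySem.List.foldl_congr_mem
  intro acc p _
  rw [List.map_map, List.foldl_map, ← PySem.List.foldl_if_eq_foldl_filter]
  rfl

theorem draw_arrows_eq (graph : List (String × List String)) :
    draw_arrows graph = draw_arrows_alt graph := by
  unfold draw_arrows draw_arrows_alt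
  simp only [keys_contains_eq, escape_eq, distance_eq]
  rw [max_dist_eq, join_empty_eq_strCat, List.map_flatMap]
  have inner : ∀ (s : String) (p : String × List String),
      p.2.foldl (fun s n_ =>
        if keyIn graph n_ then
          s ++ fmtArrow (escape p.1) (escape n_)
            (2 ^ (get_max_dist graph - distance p.1 n_).toNat)
        else s) s
      = s ++ strCat (((p.2.filter (fun n_ => keyIn graph n_)).map
          (fun n_ => (escape p.1, escape n_, distance p.1 n_))).map
          (fun e => e.1 ++ " -> " ++ e.2.1 ++ " [weight="
              ++ PySem.Int.toStr (2 ^ (get_max_dist graph - e.2.2).toNat) ++ "];\n")) := by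
    intro s p
    rw [foldl_str_append_if, List.map_map]
    rfl
  calc graph.foldl (fun s p =>
        p.2.foldl (fun s n_ =>
          if keyIn graph n_ then
            s ++ fmtArrow (escape p.1) (escape n_)
              (2 ^ (get_max_dist graph - distance p.1 n_).toNat)
          else s) s) ""
      = graph.foldl (fun s p =>
          s ++ strCat (((p.2.filter (fun n_ => keyIn graph n_)).map
            (fun n_ => (escape p.1, escape n_, distance p.1 n_))).map
            (fun e => e.1 ++ " -> " ++ e.2.1 ++ " [weight="
                ++ PySem.Int.toStr (2 ^ (get_max_dist graph - e.2.2).toNat) ++ "];\n"))) "" := by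
        apply PySem.List.foldl_congr_mem
        intro s p _
        exact inner s p
    _ = "" ++ strCat (graph.flatMap (fun p =>
          ((p.2.filter (fun n_ => keyIn graph n_)).map
            (fun n_ => (escape p.1, escape n_, distance p.1 n_))).map
            (fun e => e.1 ++ " -> " ++ e.2.1 ++ " [weight="
                ++ PySem.Int.toStr (2 ^ (get_max_dist graph - e.2.2).toNat) ++ "];\n"))) :=
        foldl_str_outer _ _ _
    _ = _ := by simp

-- ===== VERDICT (by name: the statement is the Claim_ definition above) =====
theorem draw_arrows_spec : Claim_equal_draw_arrows := by
  intro graph _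
  unfold Spec_draw_arrows
  exact (draw_arrows_eq graph).symm.symm
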